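-- pv_equiv track=rewrite | github.com/Julius-V/Project-Euler | Problem057.py | count_convergents
-- ===== SOURCE A (Python) =====
-- def count_convergents(m):
--     h = [1, 2 * 1 + 1]
--     k = [1, 2 * 1 + 0]
--     s = n = 0
--     while n < m:
--         h.append(2 * h[-1] + h[-2])
--         k.append(2 * k[-1] + k[-2])
--         s += len(str(h[-1])) > len(str(k[-1]))
--         n += 1
--     return s
-- ===== SOURCE B (Python) =====
-- def count_convergents(m):
--     ks = [1, 2]
--     for _ in range(m):
--         ks.append(2 * ks[-1] + ks[-2])
--     return sum(len(str(a + b)) > len(str(b)) for a, b in zip(ks[1:], ks[2:]))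
-- ===== Notes on version B (the rewrite author's own statement) =====
-- stated objective: alternative
-- what changed: B drops A's numerator recurrence entirely: it builds only the denominator sequence (one second-order recurrence), then a separate zip pass derives each numerator as the sum of two adjacent denominators (identity h_n = k_n + k_{n-1}) and counts digit-length wins.
import Mathlib
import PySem

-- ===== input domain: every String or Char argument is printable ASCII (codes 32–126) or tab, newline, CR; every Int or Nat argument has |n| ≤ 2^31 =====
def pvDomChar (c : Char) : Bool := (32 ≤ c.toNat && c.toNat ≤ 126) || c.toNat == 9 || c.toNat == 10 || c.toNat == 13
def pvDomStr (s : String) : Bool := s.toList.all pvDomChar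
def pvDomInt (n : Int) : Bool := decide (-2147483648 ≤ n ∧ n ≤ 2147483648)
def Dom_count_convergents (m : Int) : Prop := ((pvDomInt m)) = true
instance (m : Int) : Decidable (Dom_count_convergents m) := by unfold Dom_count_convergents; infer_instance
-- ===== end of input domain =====

-- B keeps no numerators at all: it builds only the denominator sequence and derives each
-- numerator in a second pass as the sum of two adjacent denominators (h_n = k_n + k_{n-1}).

-- ===== PORT A =====
-- xs[-1] / xs[-2]; the lists always have ≥ 2 elements, so pyGet? is always `some`
-- and the `.getD 0` default is never used (exact on every reachable state).
def pvLast1 (xs : List Int) : Int := (PySem.List.pyGet? xs (-1)).getD 0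
def pvLast2 (xs : List Int) : Int := (PySem.List.pyGet? xs (-2)).getD 0

-- the `while n < m` loop, fuel = number of remaining iterations
def pvLoopA : Nat → List Int → List Int → Int → Int
  | 0, _, _, s => s
  | f + 1, h, k, s =>
    let h' := h ++ [2 * pvLast1 h + pvLast2 h]
    let k' := k ++ [2 * pvLast1 k + pvLast2 k]
    let s' := s + (if PySem.Str.len (PySem.Int.toStr (pvLast1 h')) >
                      PySem.Str.len (PySem.Int.toStr (pvLast1 k')) then 1 else 0)
    pvLoopA f h' k' s'

def count_convergents (m : Int) : Int :=
  pvLoopA m.toNat [1, 2 * 1 + 1] [1, 2 * 1 + 0] 0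

-- ===== PORT B =====
-- pass 1: `for _ in range(m): ks.append(2*ks[-1] + ks[-2])` (fuel = number of appends)
def pvBuildKs : Nat → List Int → List Int
  | 0, ks => ks
  | f + 1, ks => pvBuildKs f (ks ++ [2 * pvLast1 ks + pvLast2 ks])

-- `len(str(a + b)) > len(str(b))` as 1/0 (Python bool summed as int)
def pvCmp (a b : Int) : Int :=
  if PySem.Str.len (PySem.Int.toStr (a + b)) > PySem.Str.len (PySem.Int.toStr b) then 1 else 0

-- pass 2: `sum(len(str(a+b)) > len(str(b)) for a, b in zip(ks[1:], ks[2:]))`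
def count_convergents_alt (m : Int) : Int :=
  let ks := pvBuildKs m.toNat [1, 2]
  ((PySem.List.slice ks (some 1) none).zip (PySem.List.slice ks (some 2) none)).foldl
    (fun s p => s + pvCmp p.1 p.2) 0

-- ===== PRECONDITION & SPEC =====
def Spec_count_convergents (m : Int) (out : Int) : Prop := out = count_convergents_alt m
instance (m : Int) (out : Int) : Decidable (Spec_count_convergents m out) := by unfold Spec_count_convergents; infer_instance

-- ===== CLAIM (what is proved, stated in full; the proofs are below) =====
def Claim_equal_count_convergents : Prop := ∀ (m : Int), Dom_count_convergents m → Spec_count_convergents m (count_convergents m)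

-- ===== LEMMAS AND PROOFS =====

theorem pvLast1_append (xs : List Int) (a b : Int) : pvLast1 (xs ++ [a, b]) = b := by
  have : xs ++ [a, b] = (xs ++ [a]) ++ [b] := by simp
  rw [pvLast1, this, PySem.List.pyGet?_neg_one_append_singleton]
  rfl

theorem pvLast2_append (xs : List Int) (a b : Int) : pvLast2 (xs ++ [a, b]) = a := by
  rw [pvLast2, PySem.List.pyGet?_neg_ofNat (xs ++ [a, b]) 2 (by omega) (by simp)]
  simp

-- abstract denominator sequence k_i, k_{i+1}, … generated by k ← 2k + k'
def pvSeqK : Nat → Int → Int → List Int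
  | 0, a, b => [a, b]
  | f + 1, a, b => a :: pvSeqK f b (2 * b + a)

theorem pvSeqK_cons (f : Nat) (a b : Int) :
    pvSeqK f a b = a :: (pvSeqK f a b).tail := by
  cases f <;> rfl

-- pass 1 of B produces exactly the abstract sequence
theorem pvBuildKs_eq_seq (f : Nat) : ∀ (ys : List Int) (a b : Int),
    pvBuildKs f (ys ++ [a, b]) = ys ++ pvSeqK f a b := by
  induction f with
  | zero => intro ys a b; rfl
  | succ f ih =>
    intro ys a b
    rw [pvBuildKs, pvLast1_append, pvLast2_append]
    have h : (ys ++ [a, b]) ++ [2 * b + a] = (ys ++ [a]) ++ [b, 2 * b + a] := by simp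
    rw [h, ih]
    simp [pvSeqK]

-- scalar loop both sides reduce to: from the pair (a, b) of consecutive denominators,
-- count pvCmp a b and advance to (b, 2b + a)
def pvLoopZ : Nat → Int → Int → Int → Int
  | 0, _, _, s => s
  | f + 1, a, b, s => pvLoopZ f b (2 * b + a) (s + pvCmp a b)

-- A's loop: the h list always ends in [b - a, a + b] when the k list ends in [a, b]
theorem pvLoopA_eq_loopZ (f : Nat) : ∀ (xs ys : List Int) (a b s : Int),
    pvLoopA f (xs ++ [b - a, a + b]) (ys ++ [a, b]) s = pvLoopZ f b (2 * b + a) s := by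
  induction f with
  | zero => intro xs ys a b s; rfl
  | succ f ih =>
    intro xs ys a b s
    rw [pvLoopA]
    simp only [pvLast1_append, pvLast2_append]
    have hh : (xs ++ [b - a, a + b]) ++ [2 * (a + b) + (b - a)] =
        (xs ++ [b - a]) ++ [(2 * b + a) - b, b + (2 * b + a)] := by
      rw [show (2 * b + a) - b = a + b by ring, show b + (2 * b + a) = 2 * (a + b) + (b - a) by ring]
      simp
    have hk : (ys ++ [a, b]) ++ [2 * b + a] = (ys ++ [a]) ++ [b, 2 * b + a] := by simp
    rw [hh, hk, pvLast1_append, pvLast1_append, ih]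
    rw [pvLoopZ]
    have : s + (if PySem.Str.len (PySem.Int.toStr (b + (2 * b + a))) >
        PySem.Str.len (PySem.Int.toStr (2 * b + a)) then 1 else 0) = s + pvCmp b (2 * b + a) := by
      rw [pvCmp]
    rw [this]

-- B's counting pass over consecutive pairs of the sequence is the same scalar loop
theorem pvZip_count_eq_loopZ (f : Nat) : ∀ (a b s : Int),
    ((pvSeqK f a b).zip (pvSeqK f a b).tail).foldl (fun s p => s + pvCmp p.1 p.2) s
      = pvLoopZ (f + 1) a b s := by
  induction f with
  | zero => intro a b s; rfl
  | succ f ih =>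
    intro a b s
    rw [pvSeqK]
    conv_lhs => rw [pvSeqK_cons f b (2 * b + a)]
    simp only [List.tail_cons, List.zip_cons_cons, List.foldl_cons]
    rw [← pvSeqK_cons, ih]
    rfl

-- ===== VERDICT (by name: the statement is the Claim_ definition above) =====
theorem count_convergents_spec : Claim_equal_count_convergents := by
  intro m _
  show count_convergents m = count_convergents_alt m
  rw [count_convergents, count_convergents_alt]
  have h1 : ([1, 2 * 1 + 1] : List Int) = [] ++ [(2 : Int) - 1, 1 + 2] := by norm_num
  have h2 : ([1, 2 * 1 + 0] : List Int) = [] ++ [(1 : Int), 2] := by norm_num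
  have hks : pvBuildKs m.toNat [1, 2] = pvSeqK m.toNat 1 2 :=
    pvBuildKs_eq_seq m.toNat [] 1 2
  rw [h1, h2, pvLoopA_eq_loopZ, hks,
      PySem.List.slice_from _ (by norm_num), PySem.List.slice_from _ (by norm_num)]
  cases hf : m.toNat with
  | zero => rfl
  | succ f =>
    have h5 : pvSeqK (f + 1) 1 2 = 1 :: pvSeqK f 2 (2 * 2 + 1) := rfl
    rw [h5]
    have hd1 : (1 :: pvSeqK f 2 (2 * 2 + 1)).drop (Int.toNat 1) = pvSeqK f 2 (2 * 2 + 1) := rfl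
    have hd2 : (1 :: pvSeqK f 2 (2 * 2 + 1)).drop (Int.toNat 2) = (pvSeqK f 2 (2 * 2 + 1)).tail := by
      rw [show Int.toNat 2 = 2 from rfl, List.drop_succ_cons, List.drop_one]
    rw [hd1, hd2]
    exact (pvZip_count_eq_loopZ f 2 (2 * 2 + 1) 0).symm
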